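-- pv_equiv track=rewrite | github.com/Inco9001/usacotraining | chapter 1/crypt1/crypt1.py | valid_combos
-- ===== SOURCE A (Python) =====
-- def toString(array):
--     var = ""
--     for t in array:
--         var += str(t)
--     return var
--
-- def is_vaild(array,arr):
--     abc = array[0]
--     d = array[1]
--     e = array[2]
--     var1 = int(abc)*(int(d)*10)
--     var2 = int(abc)*int(e)
--     var = str(var1 + var2)
--     flag = True
--     if len(var) == 4 and len(str(var1//10)) == 3 and len(str(var2)) == 3:
--         for t in var:
--             if int(t) in arr:
--                 continue
--             flag = False
--             break
--         for t in str(var1//10):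
--             if int(t) in arr:
--                 continue
--             flag = False
--             break
--         for t in str(var2):
--             if int(t) in arr:
--                 continue
--             flag = False
--             break
--     else:
--         flag = False
--     return flag
--
-- def valid_combos(array):
--     num = 0
--     for a in array:
--         for b in array:
--             for c in array:
--                 for d in array:
--                     for e in array:
--                         arr1 = []
--                         arr1.append(toString([a,b,c]))
--                         arr1.append(d)
--                         arr1.append(e)
--                         if is_vaild(arr1,array):
--                             num += 1
--
--     return num
-- ===== SOURCE B (Python) =====
-- def valid_combos(array):
--     allowed = set(array)
--
--     def digits_ok(n):
--         while True:
--             if n % 10 not in allowed: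
--                 return False
--             n //= 10
--             if n == 0:
--                 return True
--
--     num = 0
--     for a in array:
--         for b in array:
--             for c in array:
--                 abc = int(str(a) + str(b) + str(c))
--                 mults = [m for m in array
--                          if 100 <= abc * m <= 999 and digits_ok(abc * m)]
--                 for d in mults:
--                     for e in mults:
--                         if 1000 <= abc * (10 * d + e) <= 9999 and digits_ok(abc * (10 * d + e)):
--                             num += 1
--     return num
-- ===== Notes on version B (the rewrite author's own statement) =====
-- stated objective: faster
-- what changed: Instead of five flat nested loops each re-checking all three partial/full products via string lengths, B precomputes per (a,b,c) the list of valid multiplier digits (3-digit partial product with allowed digits, via arithmetic range tests and a set for membership) and only pairs those, checking the 4-digit full product arithmetically.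
import Mathlib
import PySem

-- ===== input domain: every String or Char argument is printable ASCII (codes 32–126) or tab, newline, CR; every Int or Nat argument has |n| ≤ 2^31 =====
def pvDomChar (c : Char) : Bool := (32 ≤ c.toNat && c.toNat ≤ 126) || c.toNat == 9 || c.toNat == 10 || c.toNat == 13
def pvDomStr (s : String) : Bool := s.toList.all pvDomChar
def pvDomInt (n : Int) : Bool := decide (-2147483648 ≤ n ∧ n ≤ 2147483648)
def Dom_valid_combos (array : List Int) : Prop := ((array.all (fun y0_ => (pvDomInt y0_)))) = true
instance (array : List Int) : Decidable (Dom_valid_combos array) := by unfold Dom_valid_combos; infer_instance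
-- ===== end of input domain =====

-- B precomputes, per (a,b,c), the list of valid multiplier digits and only pairs those,
-- replacing A's five flat loops with string-length checks by arithmetic range tests.

-- ===== PORT A =====
def pvToString (array : List Int) : String :=
  array.foldl (fun var t => var ++ PySem.Int.toStr t) ""

-- int(t) for a single character t; Python raises on non-digit chars — Pre_ excludes that
def pvCharInt (c : Char) : Int := (PySem.Int.ofStr? (String.ofList [c])).getD 0

-- one 'for t in s: if int(t) in arr: continue; flag = False; break' loop (returns the flag it leaves)
def pvLoopA : List Char → List Int → Bool
  | [], _ => true
  | t :: ts, arr => if arr.contains (pvCharInt t) then pvLoopA ts arr else false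

-- body of is_vaild after int(abc) (= abcI) has been computed
def pvIsVaildCore (abcI : Int) (d e : Int) (arr : List Int) : Bool :=
  let var1 := abcI * (d * 10)
  let var2 := abcI * e
  let var := PySem.Int.toStr (var1 + var2)
  if PySem.Str.len var = 4 ∧ PySem.Str.len (PySem.Int.toStr (PySem.Int.floordiv var1 10)) = 3
      ∧ PySem.Str.len (PySem.Int.toStr var2) = 3 then
    pvLoopA var.toList arr && pvLoopA (PySem.Int.toStr (PySem.Int.floordiv var1 10)).toList arr
      && pvLoopA (PySem.Int.toStr var2).toList arr
  else
    false

-- int(abc) raises ValueError when the concatenation is not an int literal — Pre_ excludes that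
def pvIsVaild (abc : String) (d e : Int) (arr : List Int) : Bool :=
  pvIsVaildCore ((PySem.Int.ofStr? abc).getD 0) d e arr

def valid_combos (array : List Int) : Int :=
  array.foldl (fun num a =>
    array.foldl (fun num b =>
      array.foldl (fun num c =>
        array.foldl (fun num d =>
          array.foldl (fun num e =>
            if pvIsVaild (pvToString [a, b, c]) d e array then num + 1 else num) num)
          num) num) num) 0

-- ===== PORT B =====
-- digits_ok: check every decimal digit of n against the allowed set, least significant first
def pvDigitsOk (allowed : PySem.Set Int) (n : Nat) : Bool :=
  if PySem.Set.contains allowed ((n % 10 : Nat) : Int) then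
    if n / 10 = 0 then true else pvDigitsOk allowed (n / 10)
  else false
termination_by n
decreasing_by exact Nat.div_lt_self (by omega) (by omega)

def valid_combos_alt (array : List Int) : Int :=
  let allowed := PySem.Set.ofList array
  array.foldl (fun num a =>
    array.foldl (fun num b =>
      array.foldl (fun num c =>
        let abc := (PySem.Int.ofStr? ((PySem.Int.toStr a ++ PySem.Int.toStr b) ++ PySem.Int.toStr c)).getD 0
        let mults := array.filter (fun m =>
          (decide (100 ≤ abc * m) && decide (abc * m ≤ 999)) && pvDigitsOk allowed (abc * m).toNat)
        mults.foldl (fun num d =>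
          mults.foldl (fun num e =>
            if (decide (1000 ≤ abc * (10 * d + e)) && decide (abc * (10 * d + e) ≤ 9999))
                && pvDigitsOk allowed (abc * (10 * d + e)).toNat then num + 1 else num) num)
          num) num) num) 0

-- ===== PRECONDITION & SPEC =====
-- A raises ValueError (int() of a string containing '-') as soon as any element is negative;
-- on arrays of nonnegative ints A returns normally.
def Pre_valid_combos (array : List Int) : Prop := ∀ x ∈ array, 0 ≤ x
instance (array : List Int) : Decidable (Pre_valid_combos array) := by
  unfold Pre_valid_combos; infer_instance
def pvWitness_valid_combos : List Int := [2, 3, 4, 6, 8]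

def Spec_valid_combos (array : List Int) (out : Int) : Prop := out = valid_combos_alt array
instance (array : List Int) (out : Int) : Decidable (Spec_valid_combos array out) := by
  unfold Spec_valid_combos; infer_instance

-- ===== CLAIM (what is proved, stated in full; the proofs are below) =====
def Claim_equal_valid_combos : Prop := ∀ (array : List Int), Dom_valid_combos array →
  Pre_valid_combos array → Spec_valid_combos array (valid_combos array)

-- ===== LEMMAS AND PROOFS =====

-- ## Nat.toDigits vs Nat.digits
lemma toDigitsCore_eq (f n : Nat) (ds : List Char) (hf : n < f) (hn : 0 < n) :
    Nat.toDigitsCore 10 f n ds = ((Nat.digits 10 n).map Nat.digitChar).reverse ++ ds := by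
  induction n using Nat.strong_induction_on generalizing f ds with
  | _ n ih =>
    obtain ⟨f', rfl⟩ : ∃ f', f = f' + 1 := ⟨f - 1, by omega⟩
    rw [show Nat.toDigitsCore 10 (f' + 1) n ds
        = (if n / 10 = 0 then (n % 10).digitChar :: ds
           else Nat.toDigitsCore 10 f' (n / 10) ((n % 10).digitChar :: ds)) from rfl]
    rw [Nat.digits_def' (by norm_num : (1:Nat) < 10) hn]
    by_cases h0 : n / 10 = 0
    · rw [if_pos h0, h0]
      simp
    · rw [if_neg h0]
      rw [ih (n / 10) (Nat.div_lt_self hn (by norm_num)) f' _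
        (by have := Nat.div_lt_self hn (show 1 < 10 by norm_num); omega)
        (Nat.pos_of_ne_zero h0)]
      simp

lemma toDigits_eq (n : Nat) (hn : 0 < n) :
    Nat.toDigits 10 n = ((Nat.digits 10 n).map Nat.digitChar).reverse := by
  rw [Nat.toDigits, toDigitsCore_eq _ _ _ (by omega) hn, List.append_nil]

-- toChars of a nonnegative int
lemma toChars_nonneg (n : Int) (hn : 0 ≤ n) :
    PySem.Int.toChars n = Nat.toDigits 10 n.toNat := by
  rw [PySem.Int.toChars, if_neg (by omega)]

-- ## string length of str(n) ↔ range, for 0 ≤ n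
lemma len_toStr_eq (n : Int) (hn : 0 ≤ n) (k : Nat) (hk : 2 ≤ k) :
    PySem.Str.len (PySem.Int.toStr n) = (k : Int) ↔ (10 : Int) ^ (k - 1) ≤ n ∧ n < 10 ^ k := by
  rw [PySem.Str.len, PySem.Int.toList_toStr, toChars_nonneg n hn]
  rcases Nat.eq_zero_or_pos n.toNat with h0 | hpos
  · rw [h0, show Nat.toDigits 10 0 = ['0'] from rfl]
    constructor
    · intro h; simp at h; omega
    · intro ⟨h1, _⟩
      exfalso
      have hn0 : n = 0 := by omega
      have : (0:Int) < 10 ^ (k-1) := by positivity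
      omega
  · rw [toDigits_eq _ hpos]
    have hlen3 : ∀ j : Nat, ((Nat.digits 10 n.toNat).length ≤ j ↔ n.toNat < 10 ^ j) :=
      fun j => Nat.digits_length_le_iff (by norm_num) n.toNat
    have hcast : ∀ j : Nat, ((n:Int) < 10 ^ j ↔ n.toNat < 10 ^ j) := by
      intro j
      have : ((10:Nat) ^ j : Int) = (10:Int) ^ j := by push_cast; ring
      omega
    simp only [List.length_reverse, List.length_map]
    constructor
    · intro h
      have hle : (Nat.digits 10 n.toNat).length ≤ k := by omega
      have hgt : ¬ ((Nat.digits 10 n.toNat).length ≤ k - 1) := by omega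
      rw [hlen3] at hle
      rw [hlen3] at hgt
      rw [Nat.not_lt] at hgt
      refine ⟨?_, (hcast k).2 hle⟩
      have : ((10:Nat) ^ (k-1) : Int) = (10:Int) ^ (k-1) := by push_cast; ring
      omega
    · intro ⟨h1, h2⟩
      have h2' := (hcast k).1 h2
      have h1' : 10 ^ (k-1) ≤ n.toNat := by
        have : ((10:Nat) ^ (k-1) : Int) = (10:Int) ^ (k-1) := by push_cast; ring
        omega
      have hle : (Nat.digits 10 n.toNat).length ≤ k := (hlen3 k).2 h2'
      have hgt : ¬ ((Nat.digits 10 n.toNat).length ≤ k - 1) := by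
        rw [hlen3]; omega
      omega

-- ## characters of str(n) for n ≥ 0 are digit chars; int(char) recovers the digit
lemma pvCharInt_digitChar (d : Nat) (hd : d < 10) : pvCharInt (Nat.digitChar d) = d := by
  interval_cases d <;> decide

lemma digitChar_ne_dash (d : Nat) (hd : d < 10) : Nat.digitChar d ≠ '-' := by
  interval_cases d <;> decide

lemma mem_toChars_ne_dash (n : Int) (hn : 0 ≤ n) :
    ∀ c ∈ PySem.Int.toChars n, c ≠ '-' := by
  intro c hc
  rw [toChars_nonneg n hn] at hc
  rcases Nat.eq_zero_or_pos n.toNat with h0 | hpos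
  · rw [h0] at hc
    simp [Nat.toDigits, Nat.toDigitsCore] at hc
    subst hc; decide
  · rw [toDigits_eq _ hpos] at hc
    simp only [List.mem_reverse, List.mem_map] at hc
    obtain ⟨d, hd, rfl⟩ := hc
    exact digitChar_ne_dash d (Nat.digits_lt_base (by norm_num) hd)

-- ## int() of a string with no '-' is nonnegative (or the ValueError default 0)
lemma aux_nonneg_bind (o : Option Nat) :
    0 ≤ (Option.map (fun n : Int => n) (do let a ← o; pure ((a : Int)))).getD 0 := by
  rcases o with _ | n <;> simp

lemma ofChars?_nonneg (cs : List Char) (h : '-' ∉ cs) :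
    0 ≤ (PySem.Int.ofChars? cs).getD 0 := by
  rw [PySem.Int.ofChars?]
  have hsub : ∀ c ∈ (List.dropWhile PySem.Int.isIntSpace
      (List.dropWhile PySem.Int.isIntSpace cs).reverse).reverse, c ∈ cs := by
    intro c hc
    rw [List.mem_reverse] at hc
    have h1 := (List.dropWhile_sublist _ (l := (List.dropWhile PySem.Int.isIntSpace cs).reverse)).subset hc
    rw [List.mem_reverse] at h1
    exact (List.dropWhile_sublist _ (l := cs)).subset h1
  split
  · rename_i ds heq
    exfalso
    exact h (hsub '-' (by rw [heq]; exact List.mem_cons_self))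
  · exact aux_nonneg_bind _
  · exact aux_nonneg_bind _

-- ## the early-break digit loop is List.all
lemma pvLoopA_eq_all (cs : List Char) (arr : List Int) :
    pvLoopA cs arr = cs.all (fun t => arr.contains (pvCharInt t)) := by
  induction cs with
  | nil => rfl
  | cons t ts ih =>
    rw [pvLoopA, List.all_cons]
    by_cases h : arr.contains (pvCharInt t) = true
    · rw [if_pos h, h, Bool.true_and, ih]
    · rw [if_neg h, Bool.not_eq_true] at *
      rw [h, Bool.false_and]

-- ## membership: List.contains vs the Set built by B
lemma contains_ofList (arr : List Int) (x : Int) :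
    PySem.Set.contains (PySem.Set.ofList arr) x = arr.contains x := by
  rw [PySem.Set.contains]
  by_cases h : x ∈ arr
  · rw [List.contains_iff_mem.2 h, List.contains_iff_mem.2 ((PySem.Set.mem_ofList arr x).2 h)]
  · have h2 : x ∉ PySem.Set.ofList arr := fun hx => h ((PySem.Set.mem_ofList arr x).1 hx)
    simp [h, h2]

-- ## B's digits_ok is 'all digits allowed', via Nat.digits
lemma pvDigitsOk_eq (s : PySem.Set Int) (m : Nat) (hm : 0 < m) :
    pvDigitsOk s m = (Nat.digits 10 m).all (fun d => PySem.Set.contains s (d : Int)) := by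
  induction m using Nat.strong_induction_on with
  | _ m ih =>
    rw [pvDigitsOk, Nat.digits_def' (by norm_num : (1:Nat) < 10) hm, List.all_cons]
    by_cases hc : PySem.Set.contains s ((m % 10 : Nat) : Int) = true
    · rw [if_pos hc, hc, Bool.true_and]
      by_cases h0 : m / 10 = 0
      · rw [if_pos h0, h0]; simp
      · rw [if_neg h0, ih (m / 10) (Nat.div_lt_self hm (by norm_num)) (Nat.pos_of_ne_zero h0)]
    · rw [if_neg hc]
      rw [Bool.not_eq_true] at hc
      rw [hc, Bool.false_and]

lemma all_congr_mem {α : Type} (l : List α) (p q : α → Bool)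
    (h : ∀ x ∈ l, p x = q x) : l.all p = l.all q := by
  induction l with
  | nil => rfl
  | cons x xs ih => rw [List.all_cons, List.all_cons, h x List.mem_cons_self,
      ih (fun y hy => h y (List.mem_cons_of_mem x hy))]

-- ## A's digit loop over str(n) equals B's arithmetic digit check, for 0 < n
lemma loopA_eq_digitsOk (n : Int) (hn : 0 < n) (arr : List Int) :
    pvLoopA (PySem.Int.toStr n).toList arr = pvDigitsOk (PySem.Set.ofList arr) n.toNat := by
  rw [pvLoopA_eq_all, PySem.Int.toList_toStr, toChars_nonneg n (by omega),
    toDigits_eq _ (by omega), pvDigitsOk_eq _ _ (by omega)]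
  rw [List.all_reverse, List.all_map]
  apply all_congr_mem
  intro d hd
  have hd10 := Nat.digits_lt_base (by norm_num : (1:Nat) < 10) hd
  simp only [Function.comp_apply]
  rw [pvCharInt_digitChar d hd10, contains_ofList]

-- ## exact floor division by 10
lemma floordiv_mul10 (x : Int) : PySem.Int.floordiv (x * (10 : Int)) 10 = x := by
  rw [PySem.Int.floordiv_eq_iff_of_pos (by norm_num)]
  constructor <;> nlinarith

-- ## len(str(n)) = 3 / 4 as ranges
lemma len3_iff (n : Int) (hn : 0 ≤ n) :
    PySem.Str.len (PySem.Int.toStr n) = 3 ↔ 100 ≤ n ∧ n < 1000 := by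
  have h := len_toStr_eq n hn 3 (by norm_num)
  norm_num at h
  rw [PySem.Str.len, PySem.Int.toList_toStr]
  exact h

lemma len4_iff (n : Int) (hn : 0 ≤ n) :
    PySem.Str.len (PySem.Int.toStr n) = 4 ↔ 1000 ≤ n ∧ n < 10000 := by
  have h := len_toStr_eq n hn 4 (by norm_num)
  norm_num at h
  rw [PySem.Str.len, PySem.Int.toList_toStr]
  exact h

-- ## decomposition of A's per-(d,e) test into B's per-multiplier tests
lemma decomp (A d e : Int) (hA : 0 ≤ A) (hd : 0 ≤ d) (he : 0 ≤ e) (arr : List Int) :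
    pvIsVaildCore A d e arr =
      (((decide (100 ≤ A * d) && decide (A * d ≤ 999)) && pvDigitsOk (PySem.Set.ofList arr) (A * d).toNat)
        && ((decide (100 ≤ A * e) && decide (A * e ≤ 999)) && pvDigitsOk (PySem.Set.ofList arr) (A * e).toNat)
        && ((decide (1000 ≤ A * (10 * d + e)) && decide (A * (10 * d + e) ≤ 9999))
              && pvDigitsOk (PySem.Set.ofList arr) (A * (10 * d + e)).toNat)) := by
  simp only [pvIsVaildCore]
  have hv1 : A * (d * 10) = A * d * 10 := by ring
  rw [hv1, floordiv_mul10, show A * d * 10 + A * e = A * (10 * d + e) from by ring]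
  have hf : 0 ≤ A * (10 * d + e) := by positivity
  have hpd : 0 ≤ A * d := by positivity
  have hpe : 0 ≤ A * e := by positivity
  by_cases hC : (1000 ≤ A * (10 * d + e) ∧ A * (10 * d + e) < 10000)
      ∧ (100 ≤ A * d ∧ A * d < 1000) ∧ (100 ≤ A * e ∧ A * e < 1000)
  · obtain ⟨hcf, hcd, hce⟩ := hC
    rw [if_pos ⟨(len4_iff _ hf).2 hcf, (len3_iff _ hpd).2 hcd, (len3_iff _ hpe).2 hce⟩]
    rw [loopA_eq_digitsOk _ (by omega) arr, loopA_eq_digitsOk _ (by omega) arr,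
      loopA_eq_digitsOk _ (by omega) arr]
    refine Bool.eq_iff_iff.mpr ?_
    simp only [Bool.and_eq_true, decide_eq_true_eq]
    constructor
    · rintro ⟨⟨hF, hD⟩, hE⟩
      exact ⟨⟨⟨⟨by omega, by omega⟩, hD⟩, ⟨⟨by omega, by omega⟩, hE⟩⟩, ⟨⟨by omega, by omega⟩, hF⟩⟩
    · rintro ⟨⟨⟨_, hD⟩, _, hE⟩, _, hF⟩
      exact ⟨⟨hF, hD⟩, hE⟩
  · rw [if_neg (fun hcond => hC ⟨(len4_iff _ hf).1 hcond.1,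
      (len3_iff _ hpd).1 hcond.2.1, (len3_iff _ hpe).1 hcond.2.2⟩)]
    symm
    rw [Bool.eq_false_iff]
    intro hR
    simp only [Bool.and_eq_true, decide_eq_true_eq] at hR
    obtain ⟨⟨⟨⟨hr1, hr2⟩, _⟩, ⟨⟨hr3, hr4⟩, _⟩⟩, ⟨⟨hr5, hr6⟩, _⟩⟩ := hR
    exact hC ⟨⟨hr5, by omega⟩, ⟨hr1, by omega⟩, ⟨hr3, by omega⟩⟩

-- ## counting: foldl with if-increment is countP
lemma foldl_count {α : Type} (p : α → Bool) (l : List α) (n : Int) :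
    l.foldl (fun n x => if p x then n + 1 else n) n = n + (l.countP p : Int) := by
  induction l generalizing n with
  | nil => simp
  | cons x xs ih =>
    rw [List.foldl_cons, ih, List.countP_cons]
    by_cases h : p x = true <;> simp [h] <;> push_cast <;> ring

lemma foldl_add_sum {α : Type} (g : α → Int) (l : List α) (n : Int) :
    l.foldl (fun n x => n + g x) n = n + (l.map g).sum :=
  PySem.List.foldl_add l g n

lemma sum_map_ite_filter {α : Type} (Q : α → Bool) (g : α → Int) (l : List α) :
    (l.map (fun d => if Q d then g d else 0)).sum = ((l.filter Q).map g).sum := by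
  induction l with
  | nil => rfl
  | cons x xs ih =>
    by_cases h : Q x = true <;> simp [h, ih]

-- ## the pair-counting lemma: pruning both inner loops to the filtered list
lemma count_pair (l : List Int) (Q : Int → Bool) (R : Int → Int → Bool) (num : Int) :
    l.foldl (fun n d => l.foldl (fun n e => if (Q d && Q e && R d e) then n + 1 else n) n) num
      = (l.filter Q).foldl (fun n d =>
          (l.filter Q).foldl (fun n e => if R d e then n + 1 else n) n) num := by
  have hinner : ∀ (d : Int) (n : Int),
      l.foldl (fun n e => if (Q d && Q e && R d e) then n + 1 else n) n
        = n + (if Q d then ((l.filter Q).countP (R d) : Int) else 0) := by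
    intro d n
    rw [foldl_count]
    by_cases hq : Q d = true
    · rw [if_pos hq]
      congr 2
      rw [List.countP_filter]
      apply List.countP_congr
      intro e _
      rw [hq, Bool.true_and, Bool.and_comm]
    · rw [if_neg hq]
      rw [Bool.not_eq_true] at hq
      have : l.countP (fun e => Q d && Q e && R d e) = 0 := by
        rw [List.countP_eq_zero]
        intro e _
        simp [hq]
      rw [this]
      simp
  have hA : l.foldl (fun n d => l.foldl (fun n e => if (Q d && Q e && R d e) then n + 1 else n) n) num
      = num + (l.map (fun d => if Q d then ((l.filter Q).countP (R d) : Int) else 0)).sum := by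
    rw [show (fun (n : Int) (d : Int) => l.foldl (fun n e => if (Q d && Q e && R d e) then n + 1 else n) n)
        = fun n d => n + (if Q d then ((l.filter Q).countP (R d) : Int) else 0) from
      funext fun n => funext fun d => hinner d n]
    exact foldl_add_sum _ l num
  have hB : (l.filter Q).foldl (fun n d =>
        (l.filter Q).foldl (fun n e => if R d e then n + 1 else n) n) num
      = num + ((l.filter Q).map (fun d => ((l.filter Q).countP (R d) : Int))).sum := by
    rw [show (fun (n : Int) (d : Int) => (l.filter Q).foldl (fun n e => if R d e then n + 1 else n) n)
        = fun n d => n + ((l.filter Q).countP (R d) : Int) from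
      funext fun n => funext fun d => foldl_count (R d) (l.filter Q) n]
    exact foldl_add_sum _ (l.filter Q) num
  rw [hA, hB, sum_map_ite_filter]

-- ## the concatenated string A builds equals B's
lemma toString_abc (a b c : Int) :
    pvToString [a, b, c] = (PySem.Int.toStr a ++ PySem.Int.toStr b) ++ PySem.Int.toStr c := by
  simp [pvToString, List.foldl]

-- ## the whole inner (d, e) double loop, for one fixed abc value A >= 0
lemma per_abc (arr : List Int) (hpre : ∀ x ∈ arr, 0 ≤ x) (A : Int) (hA : 0 ≤ A) (num : Int) :
    arr.foldl (fun num d => arr.foldl (fun num e =>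
        if pvIsVaildCore A d e arr then num + 1 else num) num) num
    = (arr.filter (fun m => (decide (100 ≤ A * m) && decide (A * m ≤ 999))
          && pvDigitsOk (PySem.Set.ofList arr) (A * m).toNat)).foldl (fun num d =>
        (arr.filter (fun m => (decide (100 ≤ A * m) && decide (A * m ≤ 999))
            && pvDigitsOk (PySem.Set.ofList arr) (A * m).toNat)).foldl (fun num e =>
          if (decide (1000 ≤ A * (10 * d + e)) && decide (A * (10 * d + e) ≤ 9999))
              && pvDigitsOk (PySem.Set.ofList arr) (A * (10 * d + e)).toNat then num + 1 else num)
          num) num := by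
  have h1 : arr.foldl (fun num d => arr.foldl (fun num e =>
        if pvIsVaildCore A d e arr then num + 1 else num) num) num
      = arr.foldl (fun num d => arr.foldl (fun num e =>
          if ((fun m => (decide (100 ≤ A * m) && decide (A * m ≤ 999))
                && pvDigitsOk (PySem.Set.ofList arr) (A * m).toNat) d
              && (fun m => (decide (100 ≤ A * m) && decide (A * m ≤ 999))
                && pvDigitsOk (PySem.Set.ofList arr) (A * m).toNat) e
              && (fun d e => (decide (1000 ≤ A * (10 * d + e)) && decide (A * (10 * d + e) ≤ 9999))
                && pvDigitsOk (PySem.Set.ofList arr) (A * (10 * d + e)).toNat) d e)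
          then num + 1 else num) num) num := by
    apply PySem.List.foldl_congr_mem
    intro num d hd
    apply PySem.List.foldl_congr_mem
    intro num e he
    rw [decomp A d e hA (hpre d hd) (hpre e he) arr]
  rw [h1]
  exact count_pair arr
    (fun m => (decide (100 ≤ A * m) && decide (A * m ≤ 999))
      && pvDigitsOk (PySem.Set.ofList arr) (A * m).toNat)
    (fun d e => (decide (1000 ≤ A * (10 * d + e)) && decide (A * (10 * d + e) ≤ 9999))
      && pvDigitsOk (PySem.Set.ofList arr) (A * (10 * d + e)).toNat) num

-- ## the abc value int() produces is nonnegative under Pre_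
lemma abc_nonneg (a b c : Int) (ha : 0 ≤ a) (hb : 0 ≤ b) (hc : 0 ≤ c) :
    0 ≤ (PySem.Int.ofStr? ((PySem.Int.toStr a ++ PySem.Int.toStr b) ++ PySem.Int.toStr c)).getD 0 := by
  rw [PySem.Int.ofStr?]
  apply ofChars?_nonneg
  intro hmem
  simp only [String.toList_append] at hmem
  rcases List.mem_append.1 hmem with h | h
  · rcases List.mem_append.1 h with h | h
    · exact mem_toChars_ne_dash a ha '-' (by rwa [PySem.Int.toList_toStr] at h) rfl
    · exact mem_toChars_ne_dash b hb '-' (by rwa [PySem.Int.toList_toStr] at h) rfl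
  · exact mem_toChars_ne_dash c hc '-' (by rwa [PySem.Int.toList_toStr] at h) rfl

-- ===== VERDICT (by name: the statement is the Claim_ definition above) =====
theorem valid_combos_spec : Claim_equal_valid_combos := by
  intro array _ hpre
  unfold Spec_valid_combos valid_combos valid_combos_alt
  refine PySem.List.foldl_congr_mem array _ _ 0 ?_
  intro num a ha
  refine PySem.List.foldl_congr_mem array _ _ num ?_
  intro num b hb
  refine PySem.List.foldl_congr_mem array _ _ num ?_
  intro num c hc
  have h1 : array.foldl (fun num d => array.foldl (fun num e =>
        if pvIsVaild (pvToString [a, b, c]) d e array then num + 1 else num) num) num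
      = array.foldl (fun num d => array.foldl (fun num e =>
          if pvIsVaildCore ((PySem.Int.ofStr? ((PySem.Int.toStr a ++ PySem.Int.toStr b)
              ++ PySem.Int.toStr c)).getD 0) d e array then num + 1 else num) num) num := by
    apply PySem.List.foldl_congr_mem
    intro num d _
    apply PySem.List.foldl_congr_mem
    intro num e _
    rw [pvIsVaild, toString_abc]
  exact h1.trans (per_abc array hpre _
    (abc_nonneg a b c (hpre a ha) (hpre b hb) (hpre c hc)) num)
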